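-- pv_equiv track=rewrite | github.com/shuishida/LangProp | src/langprop/lm_api.py | prompt_to_query
-- ===== SOURCE A (Python) =====
-- from typing import List, Union, Optional
-- from typing_extensions import TypedDict
--
-- class Role:
--     USER = "user"
--     SYSTEM = "system"
--     ASSISTANT = "assistant"
--
-- class LMQuery(TypedDict):
--     role: str
--     content: str
--
-- def prompt_to_query(prompt, init_role=Role.USER) -> List[LMQuery]:
--     results = []
--     query = {"role": init_role, "content": ""}
--     for line in prompt.split("\n"):
--         if line[:3] == "%% ":
--             if query["content"]:
--                 results.append(query)
--             role = line[3:].strip("\n").strip(" ").lower()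
--             query = {"role": role, "content": ""}
--         else:
--             query["content"] += line + "\n"
--     if query["content"]:
--         results.append(query)
--     return results
-- ===== SOURCE B (Python) =====
-- def _first_header(lines):
--     for k, line in enumerate(lines):
--         if line[:3] == "%% ":
--             return k, line
--     return None
--
--
-- def _fmt(role, body):
--     return [{"role": role, "content": "\n".join(body) + "\n"}] if body else []
--
--
-- def _emit(role, lines):
--     h = _first_header(lines)
--     if h is None:
--         return _fmt(role, lines)
--     k, line = h
--     return _fmt(role, lines[:k]) + _emit(line[3:].strip(" ").lower(), lines[k + 1:])
--
--
-- def prompt_to_query(prompt, init_role="user"):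
--     # Recursive divide-at-first-header: locate the first '%% ' line, emit the
--     # slice before it as one message, and recurse on the slice after it.
--     return _emit(init_role, prompt.split("\n"))
-- ===== Notes on version B (the rewrite author's own statement) =====
-- stated objective: alternative
-- what changed: Replaces A's single forward pass that mutates a growing content string inside a dict with a recursive divide-at-first-header algorithm: find the first '%% ' line, emit the slice of lines before it as one message, and recurse on the slice after it; output is built by concatenating recursive results.
import Mathlib
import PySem

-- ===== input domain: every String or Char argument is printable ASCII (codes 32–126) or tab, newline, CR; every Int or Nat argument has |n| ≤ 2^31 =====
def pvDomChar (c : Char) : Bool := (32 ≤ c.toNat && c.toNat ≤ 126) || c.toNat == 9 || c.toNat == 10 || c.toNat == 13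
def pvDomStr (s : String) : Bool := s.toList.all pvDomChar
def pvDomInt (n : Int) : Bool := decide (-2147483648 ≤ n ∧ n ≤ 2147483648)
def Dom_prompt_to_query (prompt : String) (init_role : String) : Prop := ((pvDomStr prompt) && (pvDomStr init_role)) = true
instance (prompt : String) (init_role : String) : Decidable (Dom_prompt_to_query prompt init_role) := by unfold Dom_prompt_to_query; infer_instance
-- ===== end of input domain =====

-- B replaces A's single forward pass with a mutable dict accumulator by a recursive
-- divide-at-first-header algorithm (slice before the first '%% ' line, recurse after it);
-- objective: alternative decomposition, same exact return value.

-- ===== PORT A =====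
-- the for-loop over prompt.split("\n"), with its (results, query) state
def pvA_loop (lines : List String) (results : List (List (String × String)))
    (query : PySem.Dict String String) : List (List (String × String)) :=
  match lines with
  | [] =>
      -- trailing 'if query["content"]: results.append(query)'
      if PySem.Dict.getD query "content" "" ≠ "" then results ++ [query.items] else results
  | line :: rest =>
      if PySem.Str.slice line none (some 3) = "%% " then
        pvA_loop rest
          (if PySem.Dict.getD query "content" "" ≠ "" then results ++ [query.items] else results)
          (PySem.Dict.ofList
            [("role", PySem.Str.lower (PySem.Str.stripChars
                (PySem.Str.stripChars (PySem.Str.slice line (some 3) none) "\n") " ")),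
             ("content", "")])
      else
        -- query["content"] += line + "\n"  (the key is always present in the dict)
        pvA_loop rest results
          (PySem.Dict.insert query "content" (PySem.Dict.getD query "content" "" ++ line ++ "\n"))

def prompt_to_query (prompt : String) (init_role : String) : List (List (String × String)) :=
  pvA_loop ((PySem.Str.split? prompt "\n").getD []) []   -- sep "\n" ≠ "": split? is always some
    (PySem.Dict.ofList [("role", init_role), ("content", "")])

-- ===== PORT B =====
-- _first_header: the enumerate loop returning (index, line) of the first '%% ' line
def pvFirstHeader (lines : List String) (k : Int) : Option (Int × String) :=
  match lines with
  | [] => none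
  | line :: rest =>
      if PySem.Str.slice line none (some 3) = "%% " then some (k, line)
      else pvFirstHeader rest (k + 1)

-- termination fact for _emit's recursion (cited by name in decreasing_by)
theorem pvFirstHeader_some_bounds (lines : List String) (k0 k : Int) (l : String)
    (h : pvFirstHeader lines k0 = some (k, l)) : k0 ≤ k ∧ k < k0 + lines.length := by
  induction lines generalizing k0 with
  | nil => simp [pvFirstHeader] at h
  | cons x t ih =>
      rw [pvFirstHeader] at h
      split_ifs at h with hx
      · rw [Option.some.injEq, Prod.mk.injEq] at h
        obtain ⟨rfl, rfl⟩ := h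
        exact ⟨le_refl _, by simp only [List.length_cons]; push_cast; omega⟩
      · obtain ⟨h1, h2⟩ := ih (k0 + 1) h
        refine ⟨by omega, ?_⟩
        simp only [List.length_cons] at h2 ⊢
        push_cast at h2 ⊢
        omega

-- _fmt
def pvFmt (role : String) (body : List String) : List (List (String × String)) :=
  if !body.isEmpty then [[("role", role), ("content", PySem.Str.join "\n" body ++ "\n")]]
  else []

-- _emit: recursive divide at the first header
def pvEmit (role : String) (lines : List String) : List (List (String × String)) :=
  match hh : pvFirstHeader lines 0 with
  | none => pvFmt role lines
  | some (k, line) =>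
      pvFmt role (PySem.List.slice lines none (some k)) ++
      pvEmit (PySem.Str.lower (PySem.Str.stripChars (PySem.Str.slice line (some 3) none) " "))
             (PySem.List.slice lines (some (k + 1)) none)
termination_by lines.length
decreasing_by
  have hb := pvFirstHeader_some_bounds lines 0 k line hh
  rw [PySem.List.slice_from _ (by omega)]
  simp only [List.length_drop]
  omega

def prompt_to_query_alt (prompt : String) (init_role : String) : List (List (String × String)) :=
  pvEmit init_role ((PySem.Str.split? prompt "\n").getD [])

-- ===== PRECONDITION & SPEC =====
def Spec_prompt_to_query (prompt : String) (init_role : String) (out : List (List (String × String))) : Prop := out = prompt_to_query_alt prompt init_role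
instance (prompt : String) (init_role : String) (out : List (List (String × String))) : Decidable (Spec_prompt_to_query prompt init_role out) := by unfold Spec_prompt_to_query; infer_instance

-- ===== CLAIM (what is proved, stated in full; the proofs are below) =====
def Claim_equal_prompt_to_query : Prop := ∀ (prompt : String) (init_role : String), Dom_prompt_to_query prompt init_role → Spec_prompt_to_query prompt init_role (prompt_to_query prompt init_role)

-- ===== LEMMAS AND PROOFS =====

-- A's running content string, expressed from the list of raw lines it came from
def pvContentOf (ls : List String) : String := ls.foldl (fun acc l => acc ++ l ++ "\n") ""

theorem pvContentOf_toList_aux (ls : List String) (a : String) :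
    (ls.foldl (fun acc l => acc ++ l ++ "\n") a).toList
      = a.toList ++ (ls.map (fun l => l.toList ++ ['\n'])).flatten := by
  induction ls generalizing a with
  | nil => simp
  | cons x t ih => simp [ih, String.toList_append]

theorem pvContentOf_toList (ls : List String) :
    (pvContentOf ls).toList = (ls.map (fun l => l.toList ++ ['\n'])).flatten := by
  simpa using pvContentOf_toList_aux ls ""

theorem pvContentOf_append_one (ls : List String) (l : String) :
    pvContentOf (ls ++ [l]) = pvContentOf ls ++ l ++ "\n" := by
  simp [pvContentOf, List.foldl_append]

theorem pvContentOf_eq_empty_iff (ls : List String) : pvContentOf ls = "" ↔ ls = [] := by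
  constructor
  · intro h
    have h' := congrArg String.toList h
    rw [pvContentOf_toList] at h'
    cases ls with
    | nil => rfl
    | cons x t => simp at h'
  · rintro rfl; rfl

theorem pvIntercalate_flatten (ls : List (List Char)) (h : ls ≠ []) :
    (ls.map (fun l => l ++ ['\n'])).flatten = List.intercalate ['\n'] ls ++ ['\n'] := by
  induction ls with
  | nil => simp at h
  | cons x t ih =>
      cases t with
      | nil => simp [List.intercalate]
      | cons y u =>
          have hrec := ih (by simp)
          have hic : ['\n'].intercalate (x :: y :: u)
              = x ++ ['\n'] ++ ['\n'].intercalate (y :: u) := by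
            have hint : List.intersperse ['\n'] (x :: y :: u)
                = x :: ['\n'] :: List.intersperse ['\n'] (y :: u) := rfl
            simp [List.intercalate, hint]
          simp only [List.map_cons, List.flatten_cons] at hrec ⊢
          rw [hrec, hic]
          simp [List.append_assoc]

theorem pvContentOf_ne_nil (ls : List String) (h : ls ≠ []) :
    pvContentOf ls = PySem.Str.join "\n" ls ++ "\n" := by
  apply String.toList_inj.mp
  rw [pvContentOf_toList, String.toList_append, PySem.Str.toList_join]
  have : ("\n" : String).toList = ['\n'] := rfl
  rw [this]
  have hmm : (List.map (fun l => l.toList ++ ['\n']) ls)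
      = List.map (fun l => l ++ ['\n']) (ls.map String.toList) := by
    rw [List.map_map]; rfl
  rw [hmm, pvIntercalate_flatten (ls.map String.toList) (by simpa using h)]
  rfl

-- a line without '\n' is unchanged by strip("\n")
theorem pvStrip_nl_of_no_nl (cs : List Char) (h : ('\n' : Char) ∉ cs) :
    PySem.Chars.stripChars cs ['\n'] = cs := by
  have hp : ∀ c ∈ cs, ((['\n'] : List Char).contains c) = false := by
    intro c hc
    simp only [List.contains_cons, List.contains_nil, Bool.or_false]
    rw [beq_eq_false_iff_ne]
    intro hce; exact h (hce ▸ hc)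
  have hdw : ∀ (p : Char → Bool) (l : List Char), (∀ c ∈ l, p c = false) →
      List.dropWhile p l = l := by
    intro p l hl
    cases l with
    | nil => rfl
    | cons c t => rw [List.dropWhile_cons, hl c (by simp)]; simp
  show (List.dropWhile (fun c => (['\n'] : List Char).contains c)
      ((List.dropWhile (fun c => (['\n'] : List Char).contains c) cs).reverse)).reverse = cs
  rw [hdw _ cs hp, hdw _ cs.reverse (fun c hc => hp c (List.mem_reverse.mp hc)),
      List.reverse_reverse]

-- A's role computation collapses to B's on newline-free lines
theorem pvRole_eq (line : String) (h : ('\n' : Char) ∉ line.toList) :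
    PySem.Str.stripChars (PySem.Str.slice line (some 3) none) "\n"
      = PySem.Str.slice line (some 3) none := by
  apply String.toList_inj.mp
  rw [PySem.Str.toList_stripChars]
  have hnl : ("\n" : String).toList = ['\n'] := rfl
  rw [hnl]
  apply pvStrip_nl_of_no_nl
  intro hmem
  apply h
  rw [PySem.Str.toList_slice, PySem.Chars.slice_eq_listSlice,
      PySem.List.slice_from line.toList (by norm_num : (0:Int) ≤ 3)] at hmem
  exact List.mem_of_mem_drop hmem

-- the Dict ops on A's two-key dict, reduced
theorem pvGetD_query (r c : String) :
    PySem.Dict.getD (PySem.Dict.ofList [("role", r), ("content", c)]) "content" "" = c := rfl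
theorem pvInsert_query (r c v : String) :
    PySem.Dict.insert (PySem.Dict.ofList [("role", r), ("content", c)]) "content" v
      = PySem.Dict.ofList [("role", r), ("content", v)] := rfl
theorem pvItems_query (r c : String) :
    (PySem.Dict.ofList [("role", r), ("content", c)]).items = [("role", r), ("content", c)] := rfl

-- A's flush of the current query equals B's _fmt of the segment's raw lines
theorem pvFlush_fmt (results : List (List (String × String))) (role : String) (ls : List String) :
    (if pvContentOf ls ≠ "" then
        results ++ [[("role", role), ("content", pvContentOf ls)]] else results)
      = results ++ pvFmt role ls := by
  by_cases hls : ls = []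
  · subst hls
    simp [pvContentOf, pvFmt]
  · rw [if_pos (by simpa using (fun h => hls ((pvContentOf_eq_empty_iff ls).mp h)))]
    have hne : (!ls.isEmpty) = true := by simpa using hls
    rw [pvFmt, if_pos hne, pvContentOf_ne_nil ls hls]

-- pvFirstHeader on a header-free list
theorem pvFirstHeader_none (ls : List String) (k0 : Int)
    (h : ∀ l ∈ ls, ¬ PySem.Str.slice l none (some 3) = "%% ") :
    pvFirstHeader ls k0 = none := by
  induction ls generalizing k0 with
  | nil => rfl
  | cons x t ih =>
      rw [pvFirstHeader, if_neg (h x (by simp))]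
      exact ih (k0 + 1) (fun l hl => h l (by simp [hl]))

-- pvFirstHeader finds the first header after a header-free prefix
theorem pvFirstHeader_append (ls : List String) (line : String) (rest : List String) (k0 : Int)
    (h : ∀ l ∈ ls, ¬ PySem.Str.slice l none (some 3) = "%% ")
    (hline : PySem.Str.slice line none (some 3) = "%% ") :
    pvFirstHeader (ls ++ line :: rest) k0 = some (k0 + ls.length, line) := by
  induction ls generalizing k0 with
  | nil => simp [pvFirstHeader, hline]
  | cons x t ih =>
      rw [List.cons_append, pvFirstHeader, if_neg (h x (by simp)),
          ih (k0 + 1) (fun l hl => h l (by simp [hl]))]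
      have hc : k0 + 1 + (t.length : Int) = k0 + ((x :: t).length : Int) := by
        push_cast [List.length_cons]; ring
      rw [hc]

-- unfolding pvEmit when the list has no header at all
theorem pvEmit_no_header (role : String) (ls : List String)
    (h : ∀ l ∈ ls, ¬ PySem.Str.slice l none (some 3) = "%% ") :
    pvEmit role ls = pvFmt role ls := by
  rw [pvEmit]
  split
  · rfl
  · rename_i k line hh
    rw [pvFirstHeader_none ls 0 h] at hh
    exact absurd hh (by simp)

-- unfolding pvEmit at the first header
theorem pvEmit_split (role : String) (ls : List String) (line : String) (rest : List String)
    (h : ∀ l ∈ ls, ¬ PySem.Str.slice l none (some 3) = "%% ")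
    (hline : PySem.Str.slice line none (some 3) = "%% ") :
    pvEmit role (ls ++ line :: rest)
      = pvFmt role ls
        ++ pvEmit (PySem.Str.lower (PySem.Str.stripChars (PySem.Str.slice line (some 3) none) " "))
             rest := by
  have hfh : pvFirstHeader (ls ++ line :: rest) 0 = some ((ls.length : Int), line) := by
    rw [pvFirstHeader_append ls line rest 0 h hline]; simp
  rw [pvEmit]
  split
  · rename_i hh
    rw [hfh] at hh; exact absurd hh (by simp)
  · rename_i k line' hh
    rw [hfh] at hh
    injection hh with h2
    injection h2 with ha hb
    rw [← ha, ← hb]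
    have h1 : PySem.List.slice (ls ++ line :: rest) none (some ((ls.length : Nat) : Int)) = ls := by
      rw [PySem.List.slice_to_natCast, List.take_left]
    have h2 : PySem.List.slice (ls ++ line :: rest) (some ((ls.length : Int) + 1)) none = rest := by
      have hcast : ((ls.length : Int) + 1) = (((ls.length + 1 : Nat)) : Int) := by push_cast; ring
      rw [hcast, PySem.List.slice_from_natCast]
      have : ls ++ line :: rest = (ls ++ [line]) ++ rest := by simp
      rw [this]
      have hlen : ls.length + 1 = (ls ++ [line]).length := by simp
      rw [hlen, List.drop_left]
    rw [h1, h2]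

-- main correspondence: A's loop state (role, accumulated lines ls) versus B's recursion
theorem pvMain (lines : List String) (results : List (List (String × String)))
    (role : String) (ls : List String)
    (hnl : ∀ l ∈ lines, ('\n' : Char) ∉ l.toList)
    (hls : ∀ l ∈ ls, ¬ PySem.Str.slice l none (some 3) = "%% ") :
    pvA_loop lines results (PySem.Dict.ofList [("role", role), ("content", pvContentOf ls)])
      = results ++ pvEmit role (ls ++ lines) := by
  induction lines generalizing results role ls with
  | nil =>
      rw [pvA_loop, List.append_nil, pvEmit_no_header role ls hls]
      simp only [pvGetD_query, pvItems_query]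
      exact pvFlush_fmt results role ls
  | cons line rest ih =>
      by_cases h : PySem.Str.slice line none (some 3) = "%% "
      · rw [pvA_loop, if_pos h, pvEmit_split role ls line rest hls h]
        rw [pvRole_eq line (hnl line (by simp))]
        have ih' := ih (if PySem.Dict.getD (PySem.Dict.ofList [("role", role), ("content", pvContentOf ls)]) "content" "" ≠ "" then
            results ++ [(PySem.Dict.ofList [("role", role), ("content", pvContentOf ls)]).items] else results)
          (PySem.Str.lower (PySem.Str.stripChars (PySem.Str.slice line (some 3) none) " "))
          [] (fun l hl => hnl l (by simp [hl])) (by simp)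
        have hc0 : pvContentOf [] = "" := rfl
        rw [hc0] at ih'
        rw [ih']
        simp only [pvGetD_query, pvItems_query, List.nil_append]
        rw [pvFlush_fmt results role ls, List.append_assoc]
      · rw [pvA_loop, if_neg h]
        rw [pvGetD_query, pvInsert_query]
        have hcontent : pvContentOf ls ++ line ++ "\n" = pvContentOf (ls ++ [line]) :=
          (pvContentOf_append_one ls line).symm
        rw [hcontent, ih results role (ls ++ [line]) (fun l hl => hnl l (by simp [hl]))
          (by intro l hl
              rcases List.mem_append.mp hl with h1 | h1
              · exact hls l h1
              · simp at h1; subst h1; exact h)]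
        simp

-- no piece of prompt.split("\n") contains '\n'
theorem pvGo_no_nl (fuel : Nat) (l cur : List Char) (acc : List (List Char))
    (hfl : l.length ≤ fuel) (hcur : ('\n' : Char) ∉ cur)
    (hacc : ∀ p ∈ acc, ('\n' : Char) ∉ p) :
    ∀ p ∈ PySem.Chars.splitOn.go ['\n'] fuel l cur acc, ('\n' : Char) ∉ p := by
  induction fuel generalizing l cur acc with
  | zero =>
      have hl : l = [] := List.length_eq_zero_iff.mp (Nat.le_zero.mp hfl)
      subst hl
      have : PySem.Chars.splitOn.go ['\n'] 0 [] cur acc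
          = ((cur.reverse ++ []) :: acc).reverse := rfl
      rw [this]
      intro p hp
      rw [List.mem_reverse] at hp
      rcases List.mem_cons.mp hp with h | h
      · subst h; simpa using (fun hm => hcur (List.mem_reverse.mp hm))
      · exact hacc p h
  | succ fuel ih =>
      cases l with
      | nil =>
          have : PySem.Chars.splitOn.go ['\n'] (fuel+1) [] cur acc
              = (cur.reverse :: acc).reverse := rfl
          rw [this]
          intro p hp
          rw [List.mem_reverse] at hp
          rcases List.mem_cons.mp hp with h | h
          · subst h; exact fun hm => hcur (List.mem_reverse.mp hm)
          · exact hacc p h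
      | cons c rest =>
          have heq : PySem.Chars.splitOn.go ['\n'] (fuel+1) (c :: rest) cur acc
              = if ['\n'].isPrefixOf (c :: rest) then
                  PySem.Chars.splitOn.go ['\n'] fuel (List.drop 1 (c :: rest)) [] (cur.reverse :: acc)
                else PySem.Chars.splitOn.go ['\n'] fuel rest (c :: cur) acc := rfl
          rw [heq]
          by_cases hpre : ['\n'].isPrefixOf (c :: rest) = true
          · rw [if_pos hpre]
            apply ih (List.drop 1 (c :: rest)) [] (cur.reverse :: acc)
            · simpa using Nat.le_of_succ_le_succ hfl
            · simp
            · intro p hp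
              rcases List.mem_cons.mp hp with h | h
              · subst h; exact fun hm => hcur (List.mem_reverse.mp hm)
              · exact hacc p h
          · rw [if_neg hpre]
            have hc : c ≠ '\n' := by
              intro hce; apply hpre
              subst hce
              simp [List.isPrefixOf]
            apply ih rest (c :: cur) acc (Nat.le_of_succ_le_succ hfl)
            · intro hm
              rcases List.mem_cons.mp hm with h | h
              · exact hc h.symm
              · exact hcur h
            · exact hacc

theorem pvSplit_no_nl (prompt : String) :
    ∀ l ∈ (PySem.Str.split? prompt "\n").getD [], ('\n' : Char) ∉ l.toList := by
  have hsp : PySem.Str.split? prompt "\n"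
      = some ((PySem.Chars.splitOn prompt.toList ['\n']).map String.ofList) := rfl
  rw [hsp]
  intro l hl
  simp only [Option.getD_some, List.mem_map] at hl
  obtain ⟨p, hp, rfl⟩ := hl
  rw [String.toList_ofList]
  have : PySem.Chars.splitOn prompt.toList ['\n']
      = PySem.Chars.splitOn.go ['\n'] (prompt.toList.length + 1) prompt.toList [] [] := rfl
  rw [this] at hp
  exact pvGo_no_nl (prompt.toList.length + 1) prompt.toList [] []
    (Nat.le_succ _) (by simp) (by simp) p hp

-- ===== VERDICT (by name: the statement is the Claim_ definition above) =====
theorem prompt_to_query_spec : Claim_equal_prompt_to_query := by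
  intro prompt init_role _
  unfold Spec_prompt_to_query prompt_to_query prompt_to_query_alt
  have h0 : ("" : String) = pvContentOf [] := rfl
  rw [h0]
  simpa using pvMain _ [] init_role [] (pvSplit_no_nl prompt) (by simp)
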